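-- pv_equiv track=rewrite | github.com/adaresa/BACKEND | Python/TalTech excercises/10/KT3 13 out 20.py | take_partial
-- ===== SOURCE A (Python) =====
-- def take_partial(text: str, leave_count: int, take_count: int) -> str:
--     """
--     Take only part of the string.
--
--     Ignore first leave_count symbols, then use next take_count symbols.
--     Repeat the process until the end of the string.
--
--     The following conditions are met (you don't have to check those):
--     leave_count >= 0
--     take_count >= 0
--     leave_count + take_count > 0
--
--     take_partial("abcdef", 2, 3) => "cde"
--     take_partial("abcdef", 0, 1) => "abcdef"
--     take_partial("abcdef", 1, 0) => ""
--     """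
--     result = ""
--     lis = list(text)
--     index = 0
--     for i in range(leave_count, len(text)):
--         if index < take_count:
--             result += lis[i]
--             index += 1
--         elif index < (take_count + leave_count):
--             index += 1
--         else:
--             if take_count != 0:
--                 result += lis[i]
--             index = 1
--     return result
-- ===== SOURCE B (Python) =====
-- def take_partial(text: str, leave_count: int, take_count: int) -> str:
--     # Slice each kept chunk directly: chunk starts are a strided range.
--     return "".join(text[j:j + take_count]
--                    for j in range(leave_count, len(text), leave_count + take_count))
-- ===== Notes on version B (the rewrite author's own statement) =====
-- stated objective: idiomatic
-- what changed: B replaces A's per-character take/skip state machine (a cyclic index counter over every character) with a single strided range over chunk-start offsets, slicing each kept chunk and joining the slices.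
-- outside the precondition, e.g. on take_partial('ab', 0, 0): A returns '', B raises ValueError; on take_partial('abc', -1, 1): A returns 'cabc', B raises ValueError; on take_partial('abc', -1, 2): A returns 'cabc', B returns 'abbcc'
import Mathlib
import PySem

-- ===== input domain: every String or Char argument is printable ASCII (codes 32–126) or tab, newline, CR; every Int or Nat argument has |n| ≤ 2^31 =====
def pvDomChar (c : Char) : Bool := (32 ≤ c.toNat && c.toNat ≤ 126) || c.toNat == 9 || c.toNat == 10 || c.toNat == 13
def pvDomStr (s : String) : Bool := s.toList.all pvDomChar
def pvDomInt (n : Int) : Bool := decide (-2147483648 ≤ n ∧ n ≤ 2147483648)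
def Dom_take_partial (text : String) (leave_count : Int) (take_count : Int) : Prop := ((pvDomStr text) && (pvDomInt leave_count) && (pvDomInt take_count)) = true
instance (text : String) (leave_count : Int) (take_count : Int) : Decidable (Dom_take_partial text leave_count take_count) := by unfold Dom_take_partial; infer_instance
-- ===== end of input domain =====

-- B slices whole chunks at strided start offsets and joins them, instead of A's per-character
-- take/skip state machine (objective: idiomatic; same O(n) cost).

-- ===== PORT A =====
-- loop body of A's for-loop: state (result, index), incoming character lis[i]
def pvAstep (leave_count take_count : Int) (st : List Char × Int) (c : Char) : List Char × Int :=
  if st.2 < take_count then (st.1 ++ [c], st.2 + 1)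
  else if st.2 < take_count + leave_count then (st.1, st.2 + 1)
  else (if take_count ≠ 0 then st.1 ++ [c] else st.1, 1)

-- result accumulated as List Char; pyGetD's default is never read under Pre_ (indices stay in range)
def take_partial (text : String) (leave_count : Int) (take_count : Int) : String :=
  let lis := text.toList
  let fin := (PySem.List.pyRange leave_count (PySem.List.len lis)).foldl
      (fun st i => pvAstep leave_count take_count st (PySem.List.pyGetD lis i ' ')) ([], 0)
  String.ofList fin.1

-- ===== PORT B =====
def take_partial_alt (text : String) (leave_count : Int) (take_count : Int) : String :=
  PySem.Str.join ""
    ((PySem.List.pyRange leave_count (PySem.Str.len text) (leave_count + take_count)).map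
      (fun j => PySem.Str.slice text (some j) (some (j + take_count))))

-- ===== PRECONDITION & SPEC =====
-- Pre_ is exactly the function's documented precondition (leave_count >= 0, take_count >= 0,
-- leave_count + take_count > 0); outside it A still returns values via Python's negative-index
-- wraparound (a defensible accident of its implementation) while B raises ValueError (zero step)
-- or slices differently, so those undocumented inputs are excluded.
def Pre_take_partial (text : String) (leave_count : Int) (take_count : Int) : Prop :=
  0 ≤ leave_count ∧ 0 ≤ take_count ∧ 0 < leave_count + take_count
instance (text : String) (leave_count : Int) (take_count : Int) : Decidable (Pre_take_partial text leave_count take_count) := by unfold Pre_take_partial; infer_instance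
def pvWitness_take_partial : String × Int × Int := ("abcdef", 2, 3)

def Spec_take_partial (text : String) (leave_count : Int) (take_count : Int) (out : String) : Prop := out = take_partial_alt text leave_count take_count
instance (text : String) (leave_count : Int) (take_count : Int) (out : String) : Decidable (Spec_take_partial text leave_count take_count out) := by unfold Spec_take_partial; infer_instance

-- ===== CLAIM (what is proved, stated in full; the proofs are below) =====
def Claim_equal_take_partial : Prop := ∀ (text : String) (leave_count : Int) (take_count : Int), Dom_take_partial text leave_count take_count → Pre_take_partial text leave_count take_count → Spec_take_partial text leave_count take_count (take_partial text leave_count take_count)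

-- ===== LEMMAS AND PROOFS =====

-- common reference function: keep tk chars of each period of max L 1 chars
def pvChunks (tk L : Nat) : List Char → List Char
  | [] => []
  | c :: cs => (c :: cs).take tk ++ pvChunks tk L ((c :: cs).drop (max L 1))
termination_by xs => xs.length
decreasing_by simp only [List.length_drop, List.length_cons]; omega

@[simp] lemma pvChunks_nil (tk L : Nat) : pvChunks tk L [] = [] := by
  simp [pvChunks.eq_def]

lemma pvChunks_cons (tk L : Nat) (c : Char) (cs : List Char) :
    pvChunks tk L (c :: cs) = (c :: cs).take tk ++ pvChunks tk L ((c :: cs).drop (max L 1)) := by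
  rw [pvChunks.eq_def]

lemma pvChunks_eq (tk L : Nat) (hL : 0 < L) (xs : List Char) :
    xs.take tk ++ pvChunks tk L (xs.drop L) = pvChunks tk L xs := by
  cases xs with
  | nil => simp
  | cons c cs =>
      rw [pvChunks_cons]
      have : max L 1 = L := by omega
      rw [this]

lemma pvRange_nil {a b s : Int} (hs : 0 < s) (h : b ≤ a) : PySem.List.pyRange a b s = [] := by
  rw [PySem.List.pyRange_of_pos a b hs, if_neg (by omega)]
  simp

lemma pvRange_cons {a b s : Int} (hs : 0 < s) (h : a < b) :
    PySem.List.pyRange a b s = a :: PySem.List.pyRange (a + s) b s := by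
  rw [PySem.List.pyRange_of_pos a b hs, PySem.List.pyRange_of_pos (a + s) b hs, if_pos h]
  have h1 : b - a + s - 1 = (b - a - 1) + 1 * s := by ring
  rw [h1, Int.add_mul_ediv_right _ _ (by omega)]
  have hq0 : 0 ≤ (b - a - 1) / s := Int.ediv_nonneg (by omega) (by omega)
  have h2 : ((b - a - 1) / s + 1).toNat = ((b - a - 1) / s).toNat + 1 := by omega
  rw [h2, List.range_succ_eq_map, List.map_cons, List.map_map]
  by_cases hab : a + s < b
  · rw [if_pos hab]
    have h3 : b - (a + s) + s - 1 = b - a - 1 := by ring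
    rw [h3]
    congr 1
    · simp
    · apply List.map_congr_left
      intro k _
      simp [Function.comp]
      ring
  · rw [if_neg hab]
    have h4 : (b - a - 1) / s = 0 := Int.ediv_eq_zero_of_lt (by omega) (by omega)
    simp [h4]

lemma pvJoin_empty_flatten : ∀ xss : List (List Char), PySem.Chars.join [] xss = xss.flatten
  | [] => by simp [PySem.Chars.join_nil]
  | [p] => by simp [PySem.Chars.join_singleton]
  | p :: q :: rest => by
      rw [PySem.Chars.join_cons_cons]
      simp [pvJoin_empty_flatten (q :: rest)]

lemma pvLoopA (lv tk : Int) (hl : 0 ≤ lv) (ht : 0 ≤ tk) (hp : 0 < lv + tk) :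
    ∀ (xs res : List Char) (idx : Int), 0 ≤ idx → idx ≤ lv + tk →
      (xs.foldl (pvAstep lv tk) (res, idx)).1
        = res ++ xs.take (tk - idx).toNat
            ++ pvChunks tk.toNat (lv + tk).toNat (xs.drop (lv + tk - idx).toNat) := by
  intro xs
  induction xs with
  | nil => intro res idx h0 h1; simp
  | cons c cs ih =>
      intro res idx h0 h1
      by_cases h1t : idx < tk
      · have step : pvAstep lv tk (res, idx) c = (res ++ [c], idx + 1) := by
          simp [pvAstep, h1t]
        rw [List.foldl_cons, step, ih (res ++ [c]) (idx + 1) (by omega) (by omega)]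
        have e1 : (tk - idx).toNat = (tk - (idx + 1)).toNat + 1 := by omega
        have e2 : (lv + tk - idx).toNat = (lv + tk - (idx + 1)).toNat + 1 := by omega
        rw [e1, e2, List.take_succ_cons, List.drop_succ_cons]
        simp
      · by_cases h2t : idx < tk + lv
        · have step : pvAstep lv tk (res, idx) c = (res, idx + 1) := by
            simp [pvAstep, h1t, h2t]
          rw [List.foldl_cons, step, ih res (idx + 1) (by omega) (by omega)]
          have e1 : (tk - idx).toNat = 0 := by omega
          have e1' : (tk - (idx + 1)).toNat = 0 := by omega
          have e2 : (lv + tk - idx).toNat = (lv + tk - (idx + 1)).toNat + 1 := by omega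
          rw [e1, e1', e2, List.drop_succ_cons]
          simp
        · have hidx : idx = lv + tk := by omega
          have step : pvAstep lv tk (res, idx) c
              = (if tk ≠ 0 then res ++ [c] else res, 1) := by
            simp only [pvAstep]
            rw [if_neg (by omega), if_neg (by omega)]
          rw [List.foldl_cons, step, ih _ 1 (by omega) (by omega)]
          have e1 : (tk - idx).toNat = 0 := by omega
          have e2 : (lv + tk - idx).toNat = 0 := by omega
          rw [e1, e2]
          simp only [List.take_zero, List.drop_zero, List.append_nil]
          rw [pvChunks_cons]
          have hmax : max (lv + tk).toNat 1 = (lv + tk).toNat := by omega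
          have e3 : (lv + tk).toNat = (lv + tk - 1).toNat + 1 := by omega
          rw [hmax, e3, List.drop_succ_cons]
          by_cases htk : tk = 0
          · simp [htk]
          · have e4 : tk.toNat = (tk - 1).toNat + 1 := by omega
            rw [if_pos htk, e4, List.take_succ_cons]
            simp

lemma pvA_eq (text : String) (lv tk : Int) (hl : 0 ≤ lv) (ht : 0 ≤ tk) (hp : 0 < lv + tk) :
    take_partial text lv tk
      = String.ofList (pvChunks tk.toNat (lv + tk).toNat (text.toList.drop lv.toNat)) := by
  unfold take_partial
  show String.ofList (List.foldl
      (fun st i => pvAstep lv tk st (PySem.List.pyGetD text.toList i ' ')) ([], 0)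
      (PySem.List.pyRange lv (PySem.List.len text.toList))).1 = _
  rw [PySem.List.foldl_pyRange_pyGetD text.toList ' '
        (pvAstep lv tk) (([], 0) : List Char × Int) hl]
  rw [pvLoopA lv tk hl ht hp (text.toList.drop lv.toNat) [] 0 (by omega) (by omega)]
  simp only [sub_zero, List.nil_append]
  rw [pvChunks_eq tk.toNat (lv + tk).toNat (by omega)]

lemma pvJoinB (tk L : Int) (lis : List Char) (ht : 0 ≤ tk) (hL : 0 < L) :
    ∀ (fuel : Nat) (a : Int), 0 ≤ a → lis.length ≤ a.toNat + fuel →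
      ((PySem.List.pyRange a (lis.length : Int) L).map
          (fun j => PySem.List.slice lis (some j) (some (j + tk)))).flatten
        = pvChunks tk.toNat L.toNat (lis.drop a.toNat) := by
  intro fuel
  induction fuel with
  | zero =>
      intro a ha hlen
      have h : (lis.length : Int) ≤ a := by omega
      rw [pvRange_nil hL h]
      have : lis.drop a.toNat = [] := List.drop_eq_nil_of_le (by omega)
      simp [this]
  | succ f ih =>
      intro a ha hlen
      by_cases hab : a < (lis.length : Int)
      · rw [pvRange_cons hL hab, List.map_cons, List.flatten_cons]
        rw [PySem.List.slice_toNat lis ha (by omega)]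
        have e1 : (a + tk).toNat - a.toNat = tk.toNat := by omega
        rw [e1]
        rw [ih (a + L) (by omega) (by omega)]
        rw [← pvChunks_eq tk.toNat L.toNat (by omega) (lis.drop a.toNat)]
        rw [List.drop_drop]
        have e2 : a.toNat + L.toNat = (a + L).toNat := by omega
        rw [e2]
      · have h : (lis.length : Int) ≤ a := by omega
        rw [pvRange_nil hL h]
        have : lis.drop a.toNat = [] := List.drop_eq_nil_of_le (by omega)
        simp [this]

lemma pvB_eq (text : String) (lv tk : Int) (hl : 0 ≤ lv) (ht : 0 ≤ tk) (hp : 0 < lv + tk) :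
    (take_partial_alt text lv tk).toList
      = pvChunks tk.toNat (lv + tk).toNat (text.toList.drop lv.toNat) := by
  unfold take_partial_alt
  rw [PySem.Str.toList_join, List.map_map]
  have hmap : (String.toList ∘ fun j => PySem.Str.slice text (some j) (some (j + tk)))
      = fun j => PySem.List.slice text.toList (some j) (some (j + tk)) := by
    funext j
    simp [PySem.Str.toList_slice]
  have hsep : ("" : String).toList = ([] : List Char) := rfl
  rw [hmap, hsep, pvJoin_empty_flatten]
  have hlen : PySem.Str.len text = (text.toList.length : Int) := by
    simp [pysem]
  rw [hlen, pvJoinB tk (lv + tk) text.toList ht hp text.toList.length lv hl (by omega)]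

-- ===== VERDICT (by name: the statement is the Claim_ definition above) =====
theorem take_partial_spec : Claim_equal_take_partial := by
  intro text lv tk _ hpre
  obtain ⟨hl, ht, hp⟩ := hpre
  unfold Spec_take_partial
  rw [← String.toList_inj, pvA_eq text lv tk hl ht hp, pvB_eq text lv tk hl ht hp]
  simp
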